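-- pv_equiv track=rewrite | github.com/celina-lopez/nft-rarity-tool | main.py | find_groupings
-- ===== SOURCE A (Python) =====
-- def find_groupings(nfts):
-- 	groupings = {}
-- 	for name in nfts:
-- 		if int(nfts[name]) not in groupings.keys():
-- 			groupings[int(nfts[name])] = 1
-- 		else:
-- 			groupings[int(nfts[name])] += 1
--
-- 	sorted_groupings = {}
-- 	for key in sorted(groupings):
-- 		sorted_groupings[key] = groupings[key]
--
-- 	return sorted_groupings
-- ===== SOURCE B (Python) =====
-- def find_groupings(nfts):
--     vals = sorted(nfts.values())
--     out = {}
--     while vals: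
--         v = vals[0]
--         run = 1
--         while run < len(vals) and vals[run] == v:
--             run += 1
--         out[v] = run
--         vals = vals[run:]
--     return out
-- ===== Notes on version B (the rewrite author's own statement) =====
-- stated objective: alternative
-- what changed: B replaces A's frequency-dict pass plus key-sort-and-reinsert pass with a single sort of the values followed by a run-length scan of the sorted list, emitting each distinct value with its run length in ascending order.
import Mathlib
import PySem

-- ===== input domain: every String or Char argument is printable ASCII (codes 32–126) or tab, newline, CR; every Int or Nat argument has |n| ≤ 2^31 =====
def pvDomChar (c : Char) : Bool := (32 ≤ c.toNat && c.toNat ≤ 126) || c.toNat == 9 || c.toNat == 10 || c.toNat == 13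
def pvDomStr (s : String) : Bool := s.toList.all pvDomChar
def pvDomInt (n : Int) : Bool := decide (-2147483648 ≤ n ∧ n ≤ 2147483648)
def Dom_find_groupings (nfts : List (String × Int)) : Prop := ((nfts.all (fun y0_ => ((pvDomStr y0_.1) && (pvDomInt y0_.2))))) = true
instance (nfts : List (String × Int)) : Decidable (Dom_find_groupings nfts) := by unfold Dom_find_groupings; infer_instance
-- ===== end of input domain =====

-- B sorts the dict's values once and emits one entry per run of equal values in the
-- sorted list, instead of A's frequency dict followed by a key-sort-and-reinsert pass;
-- same cost class, different algorithm (objective: alternative).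

-- ===== PORT A =====
-- for name in nfts: int(nfts[name]) — values are ints, int() is the identity; the
-- lookup nfts[name] is over the dict view of the association list (keys are unique).
def find_groupings (nfts : List (String × Int)) : List (Int × Int) :=
  let d := PySem.Dict.ofList nfts
  let groupings : PySem.Dict Int Int :=
    d.keys.foldl (fun g name =>
      if g.contains (d.getD name 0) = false then
        g.insert (d.getD name 0) 1
      else
        g.insert (d.getD name 0) (g.getD (d.getD name 0) 0 + 1)) PySem.Dict.empty
  let sorted_groupings : PySem.Dict Int Int :=
    (PySem.List.sorted groupings.keys (fun k => k) false).foldl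
      (fun sg key => sg.insert key (groupings.getD key 0)) PySem.Dict.empty
  sorted_groupings.items

-- ===== PORT B =====
-- the outer while loop of Source B: one dict entry (v, run) per run of equal values,
-- the inner while (counting the run) is the takeWhile, vals = vals[run:] is the drop.
def rleRuns : List Int → List (Int × Int)
  | [] => []
  | v :: rest =>
    let same := (rest.takeWhile (fun x => x == v)).length
    (v, 1 + (same : Int)) :: rleRuns (rest.drop same)
  termination_by l => l.length
  decreasing_by simp

def find_groupings_alt (nfts : List (String × Int)) : List (Int × Int) :=
  rleRuns (PySem.List.sorted (PySem.Dict.ofList nfts).values (fun x => x) false)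

-- ===== PRECONDITION & SPEC =====
def Spec_find_groupings (nfts : List (String × Int)) (out : List (Int × Int)) : Prop := out = find_groupings_alt nfts
instance (nfts : List (String × Int)) (out : List (Int × Int)) : Decidable (Spec_find_groupings nfts out) := by unfold Spec_find_groupings; infer_instance

-- ===== CLAIM (what is proved, stated in full; the proofs are below) =====
def Claim_equal_find_groupings : Prop := ∀ (nfts : List (String × Int)), Dom_find_groupings nfts → Spec_find_groupings nfts (find_groupings nfts)

-- ===== LEMMAS AND PROOFS =====

-- in a ≤-sorted list, everything after the leading run of v's is strictly above v
lemma pv_mem_dropWhile_gt (v : Int) : ∀ (rest : List Int), rest.Pairwise (· ≤ ·) →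
    (∀ x ∈ rest, v ≤ x) → ∀ x ∈ rest.dropWhile (fun y => y == v), v < x := by
  intro rest
  induction rest with
  | nil => intro _ _ x hx; simp [List.dropWhile] at hx
  | cons a t ih =>
    intro hp hv x hx
    by_cases ha : (a == v) = true
    · rw [List.dropWhile_cons, if_pos ha] at hx
      exact ih (List.Pairwise.of_cons hp) (fun y hy => hv y (List.mem_cons_of_mem a hy)) x hx
    · rw [List.dropWhile_cons, if_neg ha] at hx
      have hva : v < a := by
        have h1 : v ≤ a := hv a List.mem_cons_self
        have h2 : a ≠ v := by simpa using ha
        omega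
      rcases List.mem_cons.mp hx with rfl | hxt
      · exact hva
      · exact lt_of_lt_of_le hva ((List.pairwise_cons.mp hp).1 x hxt)

-- run-length encoding of a ≤-sorted list = (its distinct values, ascending) paired with counts
lemma pv_rle_sorted_aux : ∀ (n : Nat) (t : List Int), t.length ≤ n → t.Pairwise (· ≤ ·) →
    rleRuns t = (PySem.List.sorted (PySem.Set.ofList t) (fun k => k) false).map
      (fun k => (k, (t.count k : Int))) := by
  intro n
  induction n with
  | zero =>
    intro t ht _
    have : t = [] := List.eq_nil_of_length_eq_zero (Nat.le_zero.mp ht)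
    subst this
    simp [rleRuns, PySem.Set.ofList, PySem.List.sorted]
  | succ n ihn =>
    intro t ht hpw
    match t with
    | [] => simp [rleRuns, PySem.Set.ofList, PySem.List.sorted]
    | v :: rest =>
    rw [List.pairwise_cons] at hpw
    obtain ⟨hv, hrest⟩ := hpw
    set same := rest.takeWhile (fun x => x == v) with hsame_def
    set tail := rest.dropWhile (fun x => x == v) with htail_def
    have hsplit : same ++ tail = rest := List.takeWhile_append_dropWhile
    have hdrop : rest.drop same.length = tail := by
      conv_lhs => rw [← hsplit]
      exact List.drop_left
    have hsame_all : ∀ x ∈ same, x = v := by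
      intro x hx
      have := List.mem_takeWhile_imp hx
      simpa using this
    have htail_gt : ∀ x ∈ tail, v < x :=
      pv_mem_dropWhile_gt v rest hrest hv
    have htail_pw : tail.Pairwise (· ≤ ·) := hrest.sublist (List.dropWhile_sublist _)
    have hvnot : v ∉ tail := fun hm => absurd (htail_gt v hm) (lt_irrefl v)
    -- counts
    have hcount_v : (v :: rest).count v = 1 + same.length := by
      rw [← hsplit, List.count_cons_self, List.count_append]
      rw [List.count_eq_length.mpr (fun b hb => (hsame_all b hb).symm),
          List.count_eq_zero.mpr hvnot]
      omega
    have hcount_tail : ∀ k ∈ tail, (v :: rest).count k = tail.count k := by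
      intro k hk
      have hkv : k ≠ v := fun he => absurd (htail_gt k hk) (by rw [he]; exact lt_irrefl v)
      have h0 : same.count k = 0 := List.count_eq_zero.mpr (fun hm => hkv (hsame_all k hm))
      rw [← hsplit]
      simp [List.count_cons, List.count_append, h0]
      exact fun he => hkv he.symm
    -- the sorted distinct values of v :: rest are v followed by those of tail
    have hsd : PySem.List.sorted (PySem.Set.ofList (v :: rest)) (fun k => k) false
        = v :: PySem.List.sorted (PySem.Set.ofList tail) (fun k => k) false := by
      have hnd_t : (PySem.List.sorted (PySem.Set.ofList tail) (fun k => k) false).Nodup :=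
        (PySem.List.sorted_perm (PySem.Set.ofList tail) (fun k => k) false).symm.nodup
          (PySem.Set.nodup_ofList _)
      have hmem_t : ∀ x, x ∈ PySem.List.sorted (PySem.Set.ofList tail) (fun k => k) false ↔ x ∈ tail := by
        intro x; rw [PySem.List.mem_sorted, PySem.Set.mem_ofList]
      apply PySem.List.sorted_eq_of_perm_of_pairwise_lt
      · apply (List.perm_ext_iff_of_nodup ?_ (PySem.Set.nodup_ofList _)).mpr
        · intro a
          rw [List.mem_cons, hmem_t, PySem.Set.mem_ofList, List.mem_cons, ← hsplit,
              List.mem_append]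
          constructor
          · rintro (rfl | hm)
            · exact Or.inl rfl
            · exact Or.inr (Or.inr hm)
          · rintro (rfl | hm | hm)
            · exact Or.inl rfl
            · exact Or.inl (hsame_all a hm)
            · exact Or.inr hm
        · exact List.nodup_cons.mpr ⟨fun hm => hvnot ((hmem_t v).mp hm), hnd_t⟩
      · exact List.pairwise_cons.mpr
          ⟨fun x hx => htail_gt x ((hmem_t x).mp hx), PySem.List.sorted_ofList_pairwise_lt _⟩
    -- assemble
    have ih := ihn (rest.drop same.length)
      (by simp only [List.length_drop]; simp only [List.length_cons] at ht; omega)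
      (by rw [hdrop]; exact htail_pw)
    rw [hdrop] at ih
    have h2 : 1 + (same.length : Int) = ((1 + same.length : Nat) : Int) := by push_cast; ring
    rw [rleRuns, hsd, List.map_cons, ← hsame_def, hdrop, ih, hcount_v, ← h2]
    refine congrArg _ ?_
    refine (List.map_congr_left ?_).symm
    intro k hk
    have hkt : k ∈ tail := (PySem.Set.mem_ofList _ _).mp ((PySem.List.mem_sorted _ _ _ _).mp hk)
    rw [hcount_tail k hkt]

-- A's second loop: inserting distinct fresh keys into an empty dict appends the pairs
lemma pv_second_loop (g : PySem.Dict Int Int) (ks : List Int) (hnd : ks.Nodup) :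
    (ks.foldl (fun sg key => sg.insert key (g.getD key 0))
      (PySem.Dict.empty : PySem.Dict Int Int)).items
    = ks.map (fun k => (k, g.getD k 0)) := by
  have := PySem.Dict.items_foldl_insert_fresh (l := ks) (k := fun a => a)
    (v := fun a => g.getD a 0) (d := (PySem.Dict.empty : PySem.Dict Int Int))
    (by intro a _; exact PySem.Dict.contains_empty a) (by simpa using hnd)
  simpa using this

lemma pv_rle_sorted (t : List Int) (h : t.Pairwise (· ≤ ·)) :
    rleRuns t = (PySem.List.sorted (PySem.Set.ofList t) (fun k => k) false).map
      (fun k => (k, (t.count k : Int))) :=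
  pv_rle_sorted_aux t.length t le_rfl h

-- A's counting loop over the dict's keys is Counter(values)
lemma pv_groupings_eq_counter (nfts : List (String × Int)) :
    (PySem.Dict.ofList nfts).keys.foldl (fun g name =>
      if g.contains ((PySem.Dict.ofList nfts).getD name 0) = false then
        g.insert ((PySem.Dict.ofList nfts).getD name 0) 1
      else
        g.insert ((PySem.Dict.ofList nfts).getD name 0)
          (g.getD ((PySem.Dict.ofList nfts).getD name 0) 0 + 1)) PySem.Dict.empty
    = PySem.Dict.counter (PySem.Dict.ofList nfts).values := by
  have hnd : (PySem.Dict.ofList nfts).keys.Nodup := PySem.Dict.nodup_keys_ofList nfts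
  rw [PySem.Dict.values_eq_map_keys _ hnd 0,
      ← PySem.Dict.foldl_insert_getD_add_one_eq_counter, List.foldl_map]
  apply PySem.List.foldl_congr_mem
  intro g name _
  by_cases hc : g.contains ((PySem.Dict.ofList nfts).getD name 0) = false
  · rw [if_pos hc, PySem.Dict.getD_of_not_contains g 0 hc]
    norm_num
  · rw [if_neg hc]

-- ===== VERDICT (by name: the statement is the Claim_ definition above) =====
theorem find_groupings_spec : Claim_equal_find_groupings := by
  intro nfts _
  unfold Spec_find_groupings find_groupings find_groupings_alt
  dsimp only
  rw [pv_groupings_eq_counter, PySem.Dict.keys_counter]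
  have hperm : (PySem.List.sorted (PySem.Dict.ofList nfts).values (fun x => x) false).Perm
      (PySem.Dict.ofList nfts).values := PySem.List.sorted_perm _ _ _
  have htpw : (PySem.List.sorted (PySem.Dict.ofList nfts).values (fun x => x) false).Pairwise (· ≤ ·) := by
    have := PySem.List.sorted_pairwise (xs := (PySem.Dict.ofList nfts).values) (key := fun x => x)
    simpa using this
  have hksnd : (PySem.List.sorted (PySem.Set.ofList (PySem.Dict.ofList nfts).values)
      (fun k => k) false).Nodup :=
    (PySem.List.sorted_perm _ _ _).symm.nodup (PySem.Set.nodup_ofList _)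
  rw [pv_second_loop _ _ hksnd]
  have hofl : PySem.List.sorted (PySem.Set.ofList (PySem.Dict.ofList nfts).values) (fun k => k) false
      = PySem.List.sorted (PySem.Set.ofList (PySem.List.sorted (PySem.Dict.ofList nfts).values
          (fun x => x) false)) (fun k => k) false := by
    refine (PySem.List.sorted_eq_sorted_of_perm _ _ _ (fun a b h => h) ?_).symm
    apply (List.perm_ext_iff_of_nodup (PySem.Set.nodup_ofList _) (PySem.Set.nodup_ofList _)).mpr
    intro a
    rw [PySem.Set.mem_ofList, PySem.Set.mem_ofList, hperm.mem_iff]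
  rw [pv_rle_sorted _ htpw, ← hofl]
  apply List.map_congr_left
  intro k _
  rw [PySem.Dict.getD_counter, hperm.count_eq]
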